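-- pv_equiv track=rewrite | github.com/dawoodaijaz97/Leetcode | next-special-palindrome-number/solution.py | solve
-- ===== SOURCE A (Python) =====
-- def solve(n: int) -> int:
--     def is_special(num: int) -> bool:
--         num_str = str(num)
--         if num_str != num_str[::-1]:
--             return False
--         digit_count = {}
--         for digit in num_str:
--             if digit in digit_count:
--                 digit_count[digit] += 1
--             else:
--                 digit_count[digit] = 1
--         for digit, count in digit_count.items():
--             if int(digit) != count:
--                 return False
--         return True
--
--     n += 1
--     while not is_special(n):
--         n += 1
--     return n
-- ===== SOURCE B (Python) =====
-- # B: instead of testing every integer above n, construct the (finitely many) special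
-- # numbers directly from their digit multisets and return the first one above n.
-- # A special number is a palindrome in which each digit d occurs exactly d times, so its
-- # digit multiset is a subset S of {1..9} with each d repeated d times, and being a
-- # palindrome forces at most one odd d in S.  The bound sum(S) <= 10 (at most 10 digits)
-- # covers every n with |n| <= 2**31: the answer is then at most 2888888882.
--
-- def _subsets(ds):
--     if not ds:
--         return [[]]
--     rest = _subsets(ds[1:])
--     return rest + [[ds[0]] + s for s in rest]
--
--
-- def _perms(xs):
--     if not xs:
--         return [[]]
--     out = []
--     for i in range(len(xs)):
--         for p in _perms(xs[:i] + xs[i + 1:]):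
--             out.append([xs[i]] + p)
--     return out
--
--
-- def _value(seq):
--     v = 0
--     for d in seq:
--         v = 10 * v + d
--     return v
--
--
-- def _candidates():
--     out = []
--     for s in _subsets([1, 2, 3, 4, 5, 6, 7, 8, 9]):
--         if not s or sum(s) > 10:
--             continue
--         odds = [d for d in s if d % 2 == 1]
--         if len(odds) > 1:
--             continue
--         half = []
--         for d in s:
--             half += [d] * (d // 2)
--         for p in _perms(half):
--             out.append(_value(p + odds + p[::-1]))
--     return out
--
--
-- _CANDS = sorted(_candidates())
--
--
-- def solve(n: int) -> int:
--     for v in _CANDS: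
--         if v > n:
--             return v
--     return None
-- ===== Notes on version B (the rewrite author's own statement) =====
-- stated objective: faster
-- what changed: A scans every integer above n one by one re-checking a string palindrome/digit-count predicate; B constructs the finitely many special numbers directly from their digit multisets (subsets of {1..9} with at most one odd member, up to the 10 digits that cover |n| <= 2^31), sorts them once, and returns the first one exceeding n.
import Mathlib
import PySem

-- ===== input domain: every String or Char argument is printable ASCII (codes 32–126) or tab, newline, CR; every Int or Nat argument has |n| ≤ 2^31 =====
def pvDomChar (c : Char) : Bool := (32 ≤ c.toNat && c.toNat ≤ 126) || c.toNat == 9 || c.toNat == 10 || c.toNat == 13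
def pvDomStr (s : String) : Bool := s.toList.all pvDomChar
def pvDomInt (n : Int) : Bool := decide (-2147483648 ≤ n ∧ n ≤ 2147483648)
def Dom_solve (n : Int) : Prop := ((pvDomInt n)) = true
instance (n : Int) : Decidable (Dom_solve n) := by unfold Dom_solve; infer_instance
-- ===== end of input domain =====

-- B replaces A's unbounded one-by-one search with a direct construction: it builds every
-- "special" number (palindrome whose digit d occurs exactly d times) from its digit
-- multiset — a subset of {1..9} with at most one odd member, here bounded by 10 digits,
-- which covers every |n| ≤ 2^31 — and returns the smallest one exceeding n.

-- ===== PORT A =====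
-- int(digit) for a one-character string; Python's int() raises on non-digits, but A only
-- reaches this call on decimal-digit characters (a palindromic str(num) has no '-'), so
-- the .getD 0 default is never used on reached inputs.
def pvCharInt (c : Char) : Int := (PySem.Int.ofChars? [c]).getD 0

def pvIsSpecial (num : Int) : Bool :=
  let numStr := PySem.Int.toChars num
  if (PySem.List.slice? numStr none none (-1)).getD [] ≠ numStr then false
  else
    let digitCount := numStr.foldl (fun d digit =>
      if d.contains digit then d.insert digit (d.getD digit 0 + 1)
      else d.insert digit 1) (PySem.Dict.empty : PySem.Dict Char Int)
    digitCount.items.all (fun p => pvCharInt p.1 == p.2)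

-- the 'while not is_special(n): n += 1' loop; the fuel only makes the recursion total and
-- is never exhausted for |n| ≤ 2^31 (proved below)
def pvLoop : Nat → Int → Int
  | 0, m => m
  | f+1, m => if pvIsSpecial m then m else pvLoop f (m + 1)

def solve (n : Int) : Int := pvLoop 6000000000 (n + 1)

-- ===== PORT B =====
def altSubsets : List Nat → List (List Nat)
  | [] => [[]]
  | d :: ds =>
    let rest := altSubsets ds
    rest ++ rest.map (fun s => d :: s)

-- _perms: pick each position first, recurse on the rest; the fuel (= initial length)
-- makes the recursion structural and is never exhausted
def altPermsF : Nat → List Nat → List (List Nat)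
  | _, [] => [[]]
  | 0, _ :: _ => []
  | f+1, xs => (List.range xs.length).flatMap
      (fun i => (altPermsF f (xs.take i ++ xs.drop (i+1))).map (fun p => xs.getD i 0 :: p))

def altPerms (xs : List Nat) : List (List Nat) := altPermsF xs.length xs

def altValue (seq : List Nat) : Int := seq.foldl (fun (v : Int) (d : Nat) => 10 * v + (d : Int)) 0

def altHalf (s : List Nat) : List Nat := s.foldl (fun h d => h ++ List.replicate (d / 2) d) []

-- body of the loop over subsets in _candidates (the two 'continue's become empty blocks)
def altBlock (s : List Nat) : List Int :=
  if s = [] ∨ 10 < s.sum then []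
  else
    let odds := s.filter (fun d => d % 2 == 1)
    if 1 < odds.length then []
    else (altPerms (altHalf s)).map (fun p => altValue (p ++ odds ++ p.reverse))

def altCandsRaw : List Int :=
  (altSubsets [1, 2, 3, 4, 5, 6, 7, 8, 9]).foldl (fun out s => out ++ altBlock s) []

def altCands : List Int := PySem.List.sorted altCandsRaw (fun x => x) false

-- 'for v in _CANDS: if v > n: return v' — first hit in the sorted list; the trailing
-- 'return None' is unreachable for |n| ≤ 2^31 (the .getD 0 is never used there)
def solve_alt (n : Int) : Int := (altCands.find? (fun v => decide (n < v))).getD 0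

-- ===== PRECONDITION & SPEC =====
def Spec_solve (n : Int) (out : Int) : Prop := out = solve_alt n
instance (n : Int) (out : Int) : Decidable (Spec_solve n out) := by unfold Spec_solve; infer_instance

-- ===== CLAIM (what is proved, stated in full; the proofs are below) =====
def Claim_equal_solve : Prop := ∀ (n : Int), Dom_solve n → Spec_solve n (solve n)

-- ===== LEMMAS AND PROOFS =====

-- ---- A-side: the search loop returns the least special number ≥ its start ----
theorem pvLoop_finds (f : Nat) : ∀ (a b : Int), a ≤ b → pvIsSpecial b = true →
    (∀ m, a ≤ m → m < b → pvIsSpecial m = false) → (b - a).toNat < f →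
    pvLoop f a = b := by
  induction f with
  | zero => intro a b _ _ _ h; omega
  | succ f ih =>
    intro a b hab hb hmin hf
    by_cases ha : a = b
    · subst ha; simp [pvLoop, hb]
    · have hlt : a < b := lt_of_le_of_ne hab ha
      have h0 : pvIsSpecial a = false := hmin a le_rfl hlt
      simp only [pvLoop, h0, Bool.false_eq_true, if_false]
      exact ih (a + 1) b (by omega) hb (fun m h1 h2 => hmin m (by omega) h2) (by omega)

-- ---- the character/digit dictionary A builds is the counter of the string ----
theorem countFold_eq (cs : List Char) :
    cs.foldl (fun d digit => if d.contains digit then d.insert digit (d.getD digit 0 + 1)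
      else d.insert digit 1) (PySem.Dict.empty : PySem.Dict Char Int)
      = PySem.Dict.counter cs := by
  rw [← PySem.Dict.foldl_insert_getD_add_one_eq_counter]
  apply PySem.List.foldl_congr_mem
  intro d x _
  by_cases h : d.contains x = true
  · simp [h]
  · have h' : d.contains x = false := by simpa using h
    simp [h', PySem.Dict.getD_of_not_contains d (0 : Int) h']

def dval (c : Char) : Nat := c.toNat - 48

theorem dval_digitChar (d : Nat) (h : d < 10) : dval (Nat.digitChar d) = d := by
  interval_cases d <;> decide

theorem digitChar_dval (c : Char) (h : c.isDigit = true) : Nat.digitChar (dval c) = c := by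
  have h1 : 48 ≤ c.toNat ∧ c.toNat ≤ 57 := by
    simp only [Char.isDigit, decide_eq_true_eq, Bool.and_eq_true] at h
    exact ⟨h.1, h.2⟩
  obtain ⟨k, hk, hk10⟩ : ∃ k, c.toNat = 48 + k ∧ k < 10 := ⟨c.toNat - 48, by omega, by omega⟩
  have hc : Char.ofNat (48 + k) = c := by rw [← hk]; exact Char.ofNat_toNat c
  rw [← hc, dval]
  interval_cases k <;> decide

theorem charInt_digitChar (d : Nat) (h : d < 10) : pvCharInt (Nat.digitChar d) = (d : Int) := by
  interval_cases d <;> decide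

-- ---- characterization of A's is_special on positive numbers ----
theorem isSpecial_iff (m : Nat) (h : 0 < m) :
    pvIsSpecial (m : Int) = true ↔
      ((Nat.toDigits 10 m).reverse = Nat.toDigits 10 m ∧
       ∀ c ∈ Nat.toDigits 10 m, pvCharInt c = ((Nat.toDigits 10 m).count c : Int)) := by
  have hchars : PySem.Int.toChars (m : Int) = Nat.toDigits 10 m := by
    simp [PySem.Int.toChars]
  simp only [pvIsSpecial, hchars, PySem.List.slice?_none_none_neg_one, Option.getD_some,
    countFold_eq]
  by_cases hp : (Nat.toDigits 10 m).reverse = Nat.toDigits 10 m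
  · rw [if_neg (by simp [hp]), PySem.Dict.items_counter]
    simp only [List.all_map, List.all_eq_true, Function.comp]
    constructor
    · intro hall
      refine ⟨hp, fun c hc => ?_⟩
      simpa using hall c ((PySem.Set.mem_ofList _ c).mpr hc)
    · rintro ⟨_, hall⟩ c hc
      simpa using hall c ((PySem.Set.mem_ofList _ c).mp hc)
  · rw [if_pos (by simpa using hp)]
    simp [hp]

theorem isSpecial_nonpos (m : Int) (h : m ≤ 0) : pvIsSpecial m = false := by
  rcases lt_or_eq_of_le h with hneg | h0
  · have hchars : PySem.Int.toChars m = '-' :: Nat.toDigits 10 m.natAbs := by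
      simp [PySem.Int.toChars, hneg]
    have htne : Nat.toDigits 10 m.natAbs ≠ [] := by
      intro h'
      have hpos := Nat.length_toDigits_pos (b := 10) (n := m.natAbs)
      rw [h'] at hpos
      simp at hpos
    obtain ⟨u, t', ht⟩ := List.exists_cons_of_ne_nil htne
    have hne : ('-' :: Nat.toDigits 10 m.natAbs).reverse ≠ '-' :: Nat.toDigits 10 m.natAbs := by
      rw [ht]
      intro heq
      have h1 := congrArg List.getLast? heq
      rw [List.getLast?_reverse] at h1
      have h2 : ('-' :: u :: t').getLast? = (u :: t').getLast? := List.getLast?_cons_cons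
      have h3 : (u :: t').getLast? = some ((u :: t').getLast (by simp)) :=
        List.getLast?_eq_some_getLast _
      have h4 : (u :: t').getLast (by simp) = '-' := by
        rw [h2, h3] at h1
        simpa using h1.symm
      have h5 : ('-' : Char) ∈ u :: t' := h4 ▸ List.getLast_mem _
      have h6 : ('-' : Char).isDigit = true := by
        apply Nat.isDigit_of_mem_toDigits (b := 10) (n := m.natAbs) (by norm_num) (by norm_num)
        rw [ht]
        exact h5
      exact absurd h6 (by decide)
    simp only [pvIsSpecial, hchars, PySem.List.slice?_none_none_neg_one, Option.getD_some]
    rw [if_pos (by rw [ht] at hne ⊢; simpa using hne)]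
  · rw [h0]
    decide

-- ---- decimal value of a digit list vs Nat.toDigits ----
def valNat (ds : List Nat) : Nat := ds.foldl (fun v d => 10 * v + d) 0

theorem altValue_eq (seq : List Nat) : altValue seq = (valNat seq : Int) := by
  have key : ∀ (l : List Nat) (a : Nat),
      l.foldl (fun (v : Int) (d : Nat) => 10 * v + (d : Int)) ((a : Nat) : Int)
        = ((l.foldl (fun (v : Nat) (d : Nat) => 10 * v + d) a : Nat) : Int) := by
    intro l
    induction l with
    | nil => intro a; rfl
    | cons e t ih =>
      intro a
      simp only [List.foldl_cons]
      have h10 : ((10 : Int) * ((a : Nat) : Int) + (e : Int)) = (((10 * a + e : Nat) : Nat) : Int) := by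
        push_cast; ring
      rw [h10, ih]
  simpa [altValue, valNat] using key seq 0

theorem valNat_append (l : List Nat) (d : Nat) : valNat (l ++ [d]) = 10 * valNat l + d := by
  simp [valNat, List.foldl_append]

theorem valNat_pos (ds : List Nat) (h : ds ≠ []) (h1 : ∀ d ∈ ds, 0 < d) : 0 < valNat ds := by
  have key : ∀ (l : List Nat) (a : Nat), a ≤ l.foldl (fun v d => 10 * v + d) a := by
    intro l
    induction l with
    | nil => intro a; exact le_rfl
    | cons e t ih => intro a; exact le_trans (by omega) (ih (10 * a + e))
  obtain ⟨e, t, rfl⟩ : ∃ e t, ds = e :: t := by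
    cases ds with
    | nil => exact absurd rfl h
    | cons e t => exact ⟨e, t, rfl⟩
  have he : 0 < e := h1 e (by simp)
  have := key t (10 * 0 + e)
  simp only [valNat, List.foldl_cons]
  omega

theorem toDigits_valNat (ds : List Nat) (h0 : ds ≠ []) (h1 : ∀ d ∈ ds, 0 < d ∧ d < 10) :
    Nat.toDigits 10 (valNat ds) = ds.map Nat.digitChar := by
  induction ds using List.reverseRecOn with
  | nil => exact absurd rfl h0
  | append_singleton l d ih =>
    have hd : 0 < d ∧ d < 10 := h1 d (by simp)
    rw [valNat_append]
    by_cases hl : l = []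
    · subst hl
      have hv : 10 * valNat [] + d = d := by simp [valNat]
      rw [hv, Nat.toDigits_of_lt_base hd.2]
      simp
    · have hl1 : ∀ e ∈ l, 0 < e ∧ e < 10 := fun e he => h1 e (by simp [he])
      have hpos : 0 < valNat l := valNat_pos l hl fun e he => (hl1 e he).1
      rw [Nat.toDigits_of_base_le (by omega) (by omega)]
      have hdiv : (10 * valNat l + d) / 10 = valNat l := by omega
      have hmod : (10 * valNat l + d) % 10 = d := by omega
      rw [hdiv, hmod, ih hl hl1]
      simp

theorem valNat_toDigits (m : Nat) : valNat ((Nat.toDigits 10 m).map dval) = m := by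
  induction m using Nat.strong_induction_on with
  | _ m ih =>
    by_cases hm : m < 10
    · rw [Nat.toDigits_of_lt_base hm]
      simp [valNat, dval_digitChar m hm]
    · rw [Nat.toDigits_of_base_le (by omega) (by omega), List.map_append]
      simp only [List.map_cons, List.map_nil]
      rw [dval_digitChar (m % 10) (by omega), valNat_append, ih (m / 10) (by omega)]
      omega

-- ---- B-side membership structure ----
theorem mem_altSubsets (ds : List Nat) : ∀ l, l ∈ altSubsets ds ↔ l.Sublist ds := by
  induction ds with
  | nil => intro l; simp [altSubsets, List.sublist_nil]
  | cons d t ih =>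
    intro l
    simp only [altSubsets, List.mem_append, List.mem_map, ih, List.sublist_cons_iff]
    constructor
    · rintro (hl | ⟨r, hr, rfl⟩)
      · exact Or.inl hl
      · exact Or.inr ⟨r, rfl, hr⟩
    · rintro (hl | ⟨r, rfl, hr⟩)
      · exact Or.inl hl
      · exact Or.inr ⟨r, hr, rfl⟩

theorem mem_altPermsF (f : Nat) : ∀ (xs l : List Nat), xs.length ≤ f →
    (l ∈ altPermsF f xs ↔ l.Perm xs) := by
  induction f with
  | zero =>
    intro xs l hf
    have hxs : xs = [] := List.length_eq_zero_iff.mp (by omega)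
    subst hxs
    simp [altPermsF]
  | succ f ih =>
    intro xs l hf
    cases xs with
    | nil => simp [altPermsF]
    | cons x t =>
      show l ∈ (List.range (x :: t).length).flatMap _ ↔ _
      rw [List.mem_flatMap]
      constructor
      · rintro ⟨i, hi, hmem⟩
        rw [List.mem_range] at hi
        rcases List.mem_map.mp hmem with ⟨p, hp, rfl⟩
        have hlen : ((x :: t).take i ++ (x :: t).drop (i + 1)).length ≤ f := by
          rw [List.length_append, List.length_take, List.length_drop]
          simp only [List.length_cons] at hf hi ⊢
          omega
        have hperm : p.Perm ((x :: t).take i ++ (x :: t).drop (i + 1)) := (ih _ p hlen).mp hp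
        have hd : (x :: t).getD i 0 = (x :: t)[i] := List.getD_eq_getElem _ _ hi
        have hsplit : (x :: t).take i ++ (x :: t)[i] :: (x :: t).drop (i + 1) = x :: t := by
          rw [List.getElem_cons_drop, List.take_append_drop]
        rw [hd]
        have h1 : ((x :: t)[i] :: p).Perm
            ((x :: t)[i] :: ((x :: t).take i ++ (x :: t).drop (i + 1))) := hperm.cons _
        have h2 : ((x :: t)[i] :: ((x :: t).take i ++ (x :: t).drop (i + 1))).Perm (x :: t) := by
          conv_rhs => rw [← hsplit]
          exact List.perm_middle.symm
        exact h1.trans h2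
      · intro hl
        have hne : l ≠ [] := by
          intro hnil
          subst hnil
          simpa using hl.symm.eq_nil
        obtain ⟨c, l', rfl⟩ := List.exists_cons_of_ne_nil hne
        have hc : c ∈ x :: t := hl.subset (by simp)
        obtain ⟨i, hi, hci⟩ := List.getElem_of_mem hc
        refine ⟨i, List.mem_range.mpr hi, List.mem_map.mpr ⟨l', ?_, ?_⟩⟩
        · have hlen : ((x :: t).take i ++ (x :: t).drop (i + 1)).length ≤ f := by
            rw [List.length_append, List.length_take, List.length_drop]
            simp only [List.length_cons] at hf hi ⊢
            omega
          apply (ih _ _ hlen).mpr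
          have hsplit : (x :: t).take i ++ (x :: t)[i] :: (x :: t).drop (i + 1) = x :: t := by
            rw [List.getElem_cons_drop, List.take_append_drop]
          have hx : x :: t = (x :: t).take i ++ c :: (x :: t).drop (i + 1) := by
            rw [← hci]
            exact hsplit.symm
          have h1 : (c :: l').Perm (c :: ((x :: t).take i ++ (x :: t).drop (i + 1))) := by
            refine hl.trans ?_
            conv_lhs => rw [hx]
            exact List.perm_middle
          exact h1.cons_inv
        · rw [List.getD_eq_getElem _ _ hi, hci]

theorem mem_altPerms (xs l : List Nat) : l ∈ altPerms xs ↔ l.Perm xs := by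
  exact mem_altPermsF xs.length xs l le_rfl

theorem count_altHalf (s : List Nat) (hs : s.Nodup) (d : Nat) :
    (altHalf s).count d = if d ∈ s then d / 2 else 0 := by
  suffices h : ∀ (u : List Nat), u.Nodup →
      (u.flatMap (fun e => List.replicate (e / 2) e)).count d = if d ∈ u then d / 2 else 0 by
    rw [altHalf, PySem.List.foldl_append_eq_flatMap, List.nil_append]
    exact h s hs
  intro u hu
  induction u with
  | nil => simp
  | cons e t ih =>
    rcases List.nodup_cons.mp hu with ⟨he, ht⟩
    rw [List.flatMap_cons, List.count_append, ih ht, List.count_replicate]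
    by_cases hde : e = d
    · subst hde
      simp [he]
    · have hde' : d ≠ e := fun hh => hde hh.symm
      simp [hde, hde', List.mem_cons]

theorem altCandsRaw_eq : altCandsRaw = (altSubsets [1, 2, 3, 4, 5, 6, 7, 8, 9]).flatMap altBlock := by
  rw [altCandsRaw, PySem.List.foldl_append_eq_flatMap]
  exact List.nil_append _

theorem count_map_digitChar (seq : List Nat) (hseq : ∀ d ∈ seq, d < 10) (d : Nat) (hd : d < 10) :
    (seq.map Nat.digitChar).count (Nat.digitChar d) = seq.count d := by
  induction seq with
  | nil => simp
  | cons e t ih =>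
    have he : e < 10 := hseq e (by simp)
    have iht := ih (fun x hx => hseq x (by simp [hx]))
    by_cases hde : e = d
    · subst hde
      simp [List.count_cons, iht]
    · have hne : Nat.digitChar e ≠ Nat.digitChar d := by
        intro hh
        exact hde (by rw [← dval_digitChar e he, hh, dval_digitChar d hd])
      simp [List.count_cons, iht, hde, hne, Ne.symm hde]

theorem mem_altHalf (s : List Nat) (d : Nat) (h : d ∈ altHalf s) : d ∈ s := by
  rw [altHalf, PySem.List.foldl_append_eq_flatMap, List.nil_append] at h
  rcases List.mem_flatMap.mp h with ⟨e, he, hd⟩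
  rw [List.eq_of_mem_replicate hd]
  exact he

theorem mem_digits19 (d : Nat) : d ∈ ([1, 2, 3, 4, 5, 6, 7, 8, 9] : List Nat) ↔ 1 ≤ d ∧ d ≤ 9 := by
  simp only [List.mem_cons, List.not_mem_nil, or_false]
  omega

theorem reverse_eq_self_of_len_le_one {α : Type} (l : List α) (h : l.length ≤ 1) :
    l.reverse = l := by
  rcases l with _ | ⟨a, _ | ⟨b, t⟩⟩
  · rfl
  · rfl
  · exfalso; simp at h

theorem count_eq_one_of_nodup_mem {l : List Nat} (hnd : l.Nodup) {d : Nat} (hd : d ∈ l) :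
    l.count d = 1 := List.count_eq_one_of_mem hnd hd

-- ---- soundness: every candidate B builds is special (and positive) ----
theorem sound_altCandsRaw : ∀ v ∈ altCandsRaw, 0 < v ∧ pvIsSpecial v = true := by
  intro v hv
  rw [altCandsRaw_eq] at hv
  rcases List.mem_flatMap.mp hv with ⟨st, hst, hvb⟩
  have hsub : st.Sublist [1, 2, 3, 4, 5, 6, 7, 8, 9] := (mem_altSubsets _ st).mp hst
  have hnd : st.Nodup := hsub.nodup (by decide)
  have hmem19 : ∀ d ∈ st, 1 ≤ d ∧ d ≤ 9 := fun d hd => (mem_digits19 d).mp (hsub.subset hd)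
  rw [altBlock] at hvb
  by_cases h1 : st = [] ∨ 10 < st.sum
  · rw [if_pos h1] at hvb; cases hvb
  · rw [if_neg h1] at hvb
    push_neg at h1
    obtain ⟨hne, hsum⟩ := h1
    by_cases h2 : 1 < (st.filter (fun d => d % 2 == 1)).length
    · rw [if_pos h2] at hvb; cases hvb
    · rw [if_neg h2] at hvb
      push_neg at h2
      rcases List.mem_map.mp hvb with ⟨p, hp, rfl⟩
      have hperm : p.Perm (altHalf st) := (mem_altPerms _ p).mp hp
      have hseqmem : ∀ d ∈ p ++ st.filter (fun d => d % 2 == 1) ++ p.reverse, 1 ≤ d ∧ d ≤ 9 := by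
        intro d hd
        simp only [List.mem_append, List.mem_reverse] at hd
        rcases hd with (hd | hd) | hd
        · exact hmem19 d (mem_altHalf st d (hperm.subset hd))
        · exact hmem19 d (List.mem_of_mem_filter hd)
        · exact hmem19 d (mem_altHalf st d (hperm.subset hd))
      have hseqne : p ++ st.filter (fun d => d % 2 == 1) ++ p.reverse ≠ [] := by
        intro h0
        rw [List.append_assoc] at h0
        rcases List.append_eq_nil_iff.mp h0 with ⟨hp0, h02⟩
        rcases List.append_eq_nil_iff.mp h02 with ⟨hodds0, _⟩
        have hhalf0 : altHalf st = [] := by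
          rw [hp0] at hperm
          exact List.perm_nil.mp hperm.symm
        obtain ⟨d, hd⟩ := List.exists_mem_of_ne_nil st hne
        have hd19 := hmem19 d hd
        by_cases hpar : d % 2 = 1
        · have hdo : d ∈ st.filter (fun d => d % 2 == 1) :=
            List.mem_filter.mpr ⟨hd, by simpa using hpar⟩
          rw [hodds0] at hdo
          cases hdo
        · have hc := count_altHalf st hnd d
          rw [hhalf0, if_pos hd] at hc
          simp only [List.count_nil] at hc
          omega
      have hcount : ∀ d ∈ st, (p ++ st.filter (fun d => d % 2 == 1) ++ p.reverse).count d = d := by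
        intro d hd
        have hc : (p ++ st.filter (fun d => d % 2 == 1) ++ p.reverse).count d
            = p.count d + ((st.filter (fun d => d % 2 == 1)).count d + p.reverse.count d) := by
          rw [List.append_assoc, List.count_append, List.count_append]
        rw [List.count_reverse] at hc
        have hcp : p.count d = d / 2 := by
          rw [hperm.count_eq d, count_altHalf st hnd d, if_pos hd]
        have hco : (st.filter (fun d => d % 2 == 1)).count d = if d % 2 = 1 then 1 else 0 := by
          by_cases hpar : d % 2 = 1
          · rw [if_pos hpar, List.count_filter (by simpa using hpar)]
            exact count_eq_one_of_nodup_mem hnd hd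
          · rw [if_neg hpar]
            apply List.count_eq_zero.mpr
            intro hmemf
            exact hpar (by simpa using (List.mem_filter.mp hmemf).2)
        rw [hcp, hco] at hc
        rw [hc]
        by_cases hpar : d % 2 = 1
        · rw [if_pos hpar]; omega
        · rw [if_neg hpar]; omega
      have hseqst : ∀ d ∈ p ++ st.filter (fun d => d % 2 == 1) ++ p.reverse, d ∈ st := by
        intro d hd
        simp only [List.mem_append, List.mem_reverse] at hd
        rcases hd with (hd | hd) | hd
        · exact mem_altHalf st d (hperm.subset hd)
        · exact List.mem_of_mem_filter hd
        · exact mem_altHalf st d (hperm.subset hd)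
      have hpal : (p ++ st.filter (fun d => d % 2 == 1) ++ p.reverse).reverse
          = p ++ st.filter (fun d => d % 2 == 1) ++ p.reverse := by
        simp [List.reverse_append, reverse_eq_self_of_len_le_one _ h2, List.append_assoc]
      have hmpos : 0 < valNat (p ++ st.filter (fun d => d % 2 == 1) ++ p.reverse) :=
        valNat_pos _ hseqne (fun d hd => (hseqmem d hd).1)
      have hdig : Nat.toDigits 10 (valNat (p ++ st.filter (fun d => d % 2 == 1) ++ p.reverse))
          = (p ++ st.filter (fun d => d % 2 == 1) ++ p.reverse).map Nat.digitChar :=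
        toDigits_valNat _ hseqne
          (fun d hd => ⟨(hseqmem d hd).1, by have := (hseqmem d hd).2; omega⟩)
      constructor
      · rw [altValue_eq]
        exact_mod_cast hmpos
      · rw [altValue_eq, isSpecial_iff _ hmpos]
        constructor
        · rw [hdig, ← List.map_reverse, hpal]
        · intro c hc
          rw [hdig] at hc
          rcases List.mem_map.mp hc with ⟨d, hd, rfl⟩
          have hd10 : d < 10 := by have := (hseqmem d hd).2; omega
          rw [charInt_digitChar d hd10, hdig,
            count_map_digitChar _ (fun e he => by have := (hseqmem e he).2; omega) d hd10,
            hcount d (hseqst d hd)]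

theorem dval_lt_ten (c : Char) (h : c.isDigit = true) : dval c < 10 := by
  have h1 : 48 ≤ c.toNat ∧ c.toNat ≤ 57 := by
    simp only [Char.isDigit, decide_eq_true_eq, Bool.and_eq_true] at h
    exact ⟨h.1, h.2⟩
  unfold dval
  omega

theorem eq_singleton_of_nodup_all {l : List Nat} {a : Nat} (hnd : l.Nodup) (ha : a ∈ l)
    (hall : ∀ x ∈ l, x = a) : l = [a] := by
  cases l with
  | nil => cases ha
  | cons b t =>
    have hb : b = a := hall b (by simp)
    subst hb
    rcases List.nodup_cons.mp hnd with ⟨hbt, _⟩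
    have ht : t = [] := by
      cases t with
      | nil => rfl
      | cons c u =>
        have hc : c = b := hall c (by simp)
        exact absurd (hc ▸ List.mem_cons_self) hbt
    rw [ht]

theorem length_eq_sum_counts : ∀ (s : List Nat), s.Nodup → ∀ (ds : List Nat),
    (∀ d ∈ ds, d ∈ s) → ds.length = (s.map (fun d => ds.count d)).sum := by
  intro s
  induction s with
  | nil =>
    intro _ ds hds
    have hnil : ds = [] := List.eq_nil_iff_forall_not_mem.mpr (fun a ha => by cases hds a ha)
    subst hnil
    rfl
  | cons a t ih =>
    intro hnd ds hds
    rcases List.nodup_cons.mp hnd with ⟨ha, ht⟩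
    have hsplit : ds.length = ds.countP (· == a) + ds.countP (fun x => !(x == a)) := by
      have h := List.length_eq_countP_add_countP (p := (· == a)) (l := ds)
      simpa using h
    have hrec := ih ht (ds.filter (fun x => !(x == a))) (by
      intro x hx
      rcases List.mem_filter.mp hx with ⟨hx1, hx2⟩
      rcases List.mem_cons.mp (hds x hx1) with h | h
      · exfalso; simp at hx2; exact hx2 h
      · exact h)
    have hmapeq : t.map (fun d => (ds.filter (fun x => !(x == a))).count d)
        = t.map (fun d => ds.count d) := by
      apply List.map_congr_left
      intro d hd
      have hne : (!(d == a)) = true := by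
        simp only [Bool.not_eq_true', beq_eq_false_iff_ne, ne_eq]
        intro h
        exact ha (h ▸ hd)
      exact List.count_filter hne
    have hflt : (ds.filter (fun x => !(x == a))).length = ds.countP (fun x => !(x == a)) :=
      List.countP_eq_length_filter.symm
    have hcnt : ds.count a = ds.countP (· == a) := rfl
    simp only [List.map_cons, List.sum_cons]
    rw [← hmapeq, ← hrec, hcnt, hflt]
    exact hsplit

-- ---- completeness: every special number below 10^10 is among B's candidates ----
theorem complete_altCandsRaw (m : Nat) (h0 : 0 < m) (hlt : m < 10 ^ 10)
    (hs : pvIsSpecial (m : Int) = true) : (m : Int) ∈ altCandsRaw := by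
  obtain ⟨hpal, hcnt⟩ := (isSpecial_iff m h0).mp hs
  have hdigit : ∀ c ∈ Nat.toDigits 10 m, c.isDigit = true := fun c hc =>
    Nat.isDigit_of_mem_toDigits (by norm_num) (by norm_num) hc
  have hmapid : ((Nat.toDigits 10 m).map dval).map Nat.digitChar = Nat.toDigits 10 m := by
    rw [List.map_map]
    have hpt : ∀ c ∈ Nat.toDigits 10 m, (Nat.digitChar ∘ dval) c = id c := fun c hc =>
      digitChar_dval c (hdigit c hc)
    rw [List.map_congr_left hpt, List.map_id]
  set ds := (Nat.toDigits 10 m).map dval with hds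
  have hds10 : ∀ d ∈ ds, d < 10 := by
    intro d hd
    rcases List.mem_map.mp hd with ⟨c, hc, rfl⟩
    exact dval_lt_ten c (hdigit c hc)
  have hcount_ds : ∀ d ∈ ds, ds.count d = d := by
    intro d hd
    have hd10 := hds10 d hd
    have hmem : Nat.digitChar d ∈ Nat.toDigits 10 m := by
      rw [← hmapid]
      exact List.mem_map_of_mem hd
    have hcc := hcnt (Nat.digitChar d) hmem
    rw [charInt_digitChar d hd10] at hcc
    have hcm : (Nat.toDigits 10 m).count (Nat.digitChar d) = ds.count d := by
      rw [← hmapid]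
      exact count_map_digitChar ds hds10 d hd10
    rw [hcm] at hcc
    exact_mod_cast hcc.symm
  have h0ds : ∀ d ∈ ds, 0 < d := by
    intro d hd
    have h1 := hcount_ds d hd
    have h2 : 0 < ds.count d := List.count_pos_iff.mpr hd
    omega
  have hdsne : ds ≠ [] := by
    intro hnil
    have := Nat.length_toDigits_pos (b := 10) (n := m)
    rw [hds] at hnil
    rcases List.map_eq_nil_iff.mp hnil with h
    rw [h] at this
    simp at this
  have hpal_ds : ds.reverse = ds := by
    rw [hds, ← List.map_reverse, hpal]
  have hlen10 : ds.length ≤ 10 := by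
    rw [hds, List.length_map]
    exact (Nat.length_toDigits_le_iff (by norm_num) (by norm_num)).mpr hlt
  set st := ([1, 2, 3, 4, 5, 6, 7, 8, 9] : List Nat).filter (fun d => decide (d ∈ ds)) with hst
  have hsub : st.Sublist [1, 2, 3, 4, 5, 6, 7, 8, 9] := List.filter_sublist
  have hnd : st.Nodup := hsub.nodup (by decide)
  have hmem_st : ∀ d, d ∈ st ↔ d ∈ ds := by
    intro d
    rw [hst]
    simp only [List.mem_filter, decide_eq_true_eq]
    constructor
    · exact fun h => h.2
    · intro hdds
      exact ⟨(mem_digits19 d).mpr ⟨h0ds d hdds, by have := hds10 d hdds; omega⟩, hdds⟩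
  have hstsum : st.sum = ds.length := by
    rw [length_eq_sum_counts st hnd ds (fun d hd => (hmem_st d).mpr hd)]
    have hmc : st.map (fun d => ds.count d) = st.map id :=
      List.map_congr_left (fun d hd => hcount_ds d ((hmem_st d).mp hd))
    rw [hmc, List.map_id]
  have hstne : st ≠ [] := by
    obtain ⟨d, hd⟩ := List.exists_mem_of_ne_nil ds hdsne
    intro hnil
    have := (hmem_st d).mpr hd
    rw [hnil] at this
    cases this
  -- palindrome decomposition ds = p ++ mid ++ p.reverse
  have hsplit : ds = ds.take (ds.length / 2) ++ (ds.drop (ds.length / 2)).take (ds.length % 2)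
      ++ (ds.take (ds.length / 2)).reverse := by
    have h1 : (ds.take (ds.length / 2)).reverse
        = ds.drop (ds.length / 2 + ds.length % 2) := by
      rw [List.reverse_take, hpal_ds]
      congr 1
      omega
    rw [h1, ← List.take_add, List.take_append_drop]
  have hcnt_split : ∀ d, ds.count d = 2 * (ds.take (ds.length / 2)).count d
      + ((ds.drop (ds.length / 2)).take (ds.length % 2)).count d := by
    intro d
    conv_lhs => rw [hsplit]
    rw [List.count_append, List.count_append, List.count_reverse]
    ring
  -- the odd digits of st are exactly the middle part
  have hodds_eq : st.filter (fun d => d % 2 == 1)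
      = (ds.drop (ds.length / 2)).take (ds.length % 2) := by
    rcases Nat.mod_two_eq_zero_or_one ds.length with hr | hr
    · rw [hr]
      simp only [List.take_zero]
      apply List.filter_eq_nil_iff.mpr
      intro d hdst
      have h1 := hcount_ds d ((hmem_st d).mp hdst)
      have h2 := hcnt_split d
      rw [hr] at h2
      simp only [List.take_zero, List.count_nil] at h2
      simp only [beq_iff_eq]
      omega
    · rw [hr]
      have hdropne : ds.drop (ds.length / 2) ≠ [] := by
        intro hnil
        have := congrArg List.length hnil
        rw [List.length_drop] at this
        simp only [List.length_nil] at this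
        omega
      obtain ⟨e0, rest, hdrop⟩ := List.exists_cons_of_ne_nil hdropne
      have hmid : (ds.drop (ds.length / 2)).take 1 = [e0] := by
        rw [hdrop]
        rfl
      have he0ds : e0 ∈ ds := by
        have hm : e0 ∈ ds.drop (ds.length / 2) := by
          rw [hdrop]
          exact List.mem_cons_self
        exact List.mem_of_mem_drop hm
      have he0odd : e0 % 2 = 1 := by
        have h1 := hcount_ds e0 he0ds
        have h2 := hcnt_split e0
        rw [hr, hmid] at h2
        simp only [List.count_singleton] at h2
        simp only [beq_self_eq_true, if_pos] at h2
        omega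
      have hall : ∀ x ∈ st.filter (fun d => d % 2 == 1), x = e0 := by
        intro x hx
        rcases List.mem_filter.mp hx with ⟨hxst, hxodd⟩
        by_contra hne
        have h1 := hcount_ds x ((hmem_st x).mp hxst)
        have h2 := hcnt_split x
        rw [hr, hmid] at h2
        have hc0 : ([e0] : List Nat).count x = 0 := by
          simp [List.count_singleton]
          intro he
          exact hne he.symm
        rw [hc0] at h2
        have hxo : x % 2 = 1 := by simpa using hxodd
        omega
      have he0f : e0 ∈ st.filter (fun d => d % 2 == 1) :=
        List.mem_filter.mpr ⟨(hmem_st e0).mpr he0ds, by simpa using he0odd⟩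
      rw [hmid]
      exact eq_singleton_of_nodup_all (hnd.filter _) he0f hall
  -- first half is a permutation of B's half multiset
  have hpperm : (ds.take (ds.length / 2)).Perm (altHalf st) := by
    rw [List.perm_iff_count]
    intro d
    rw [count_altHalf st hnd d]
    by_cases hdst : d ∈ st
    · rw [if_pos hdst]
      have h1 := hcount_ds d ((hmem_st d).mp hdst)
      have h2 := hcnt_split d
      have h3 : ((ds.drop (ds.length / 2)).take (ds.length % 2)).count d
          = (st.filter (fun x => x % 2 == 1)).count d := by rw [hodds_eq]
      have h4 : (st.filter (fun x => x % 2 == 1)).count d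
          = if d % 2 = 1 then 1 else 0 := by
        by_cases hpar : d % 2 = 1
        · rw [if_pos hpar, List.count_filter (by simpa using hpar)]
          exact count_eq_one_of_nodup_mem hnd hdst
        · rw [if_neg hpar]
          apply List.count_eq_zero.mpr
          intro hmemf
          exact hpar (by simpa using (List.mem_filter.mp hmemf).2)
      rw [h3, h4] at h2
      by_cases hpar : d % 2 = 1
      · rw [if_pos hpar] at h2; omega
      · rw [if_neg hpar] at h2; omega
    · rw [if_neg hdst]
      apply List.count_eq_zero.mpr
      intro hdp
      exact hdst ((hmem_st d).mpr (List.take_subset _ _ hdp))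
  -- assemble the membership
  rw [altCandsRaw_eq]
  apply List.mem_flatMap.mpr
  refine ⟨st, (mem_altSubsets _ st).mpr hsub, ?_⟩
  rw [altBlock, if_neg (by
    push_neg
    exact ⟨hstne, by omega⟩)]
  rw [if_neg (by
    rw [hodds_eq]
    rcases Nat.mod_two_eq_zero_or_one ds.length with hr | hr
    · rw [hr]; simp
    · rw [hr, List.length_take]; omega)]
  apply List.mem_map.mpr
  refine ⟨ds.take (ds.length / 2), (mem_altPerms _ _).mpr hpperm, ?_⟩
  rw [hodds_eq, ← hsplit, altValue_eq]
  have hv : valNat ds = m := by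
    rw [hds]
    exact valNat_toDigits m
  rw [hv]

-- ---- first element above n of a sorted list is the least such element ----
theorem find?_sorted_least (l : List Int) (hl : l.Pairwise (· ≤ ·)) (n b : Int)
    (hbl : b ∈ l) (hbn : n < b) (hmin : ∀ c ∈ l, n < c → b ≤ c) :
    l.find? (fun v => decide (n < v)) = some b := by
  induction l with
  | nil => cases hbl
  | cons h t ih =>
    rcases List.pairwise_cons.mp hl with ⟨hle, ht⟩
    by_cases hh : n < h
    · have hbh : b = h := by
        rcases List.mem_cons.mp hbl with rfl | hm
        · rfl
        · exact le_antisymm (hmin h (by simp) hh) (hle b hm)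
      simp [List.find?, hh, hbh]
    · have hbt : b ∈ t := by
        rcases List.mem_cons.mp hbl with rfl | hm
        · exact absurd hbn hh
        · exact hm
      have : t.find? (fun v => decide (n < v)) = some b :=
        ih ht hbt (fun c hc hcn => hmin c (by simp [hc]) hcn)
      simp [List.find?, hh, this]

-- ===== VERDICT (by name: the statement is the Claim_ definition above) =====
theorem solve_spec : Claim_equal_solve := by
  intro n hDom
  unfold Spec_solve
  have hn : -2147483648 ≤ n ∧ n ≤ 2147483648 := by
    simpa [Dom_solve, pvDomInt] using hDom
  have hCs : pvIsSpecial (2888888882 : Int) = true := by decide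
  have hex : ∃ k : Nat, pvIsSpecial (n + 1 + (k : Int)) = true := by
    refine ⟨(2888888882 - n - 1).toNat, ?_⟩
    have heq : n + 1 + (((2888888882 - n - 1).toNat : Nat) : Int) = 2888888882 := by omega
    rw [heq]
    exact hCs
  have hbs : pvIsSpecial (n + 1 + ((Nat.find hex : Nat) : Int)) = true := Nat.find_spec hex
  set b := n + 1 + ((Nat.find hex : Nat) : Int) with hb
  have hnb : n < b := by
    have : (0 : Int) ≤ ((Nat.find hex : Nat) : Int) := Int.natCast_nonneg _
    omega
  have hmin : ∀ m, n < m → m < b → pvIsSpecial m = false := by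
    intro m h1 h2
    have hj : m = n + 1 + (((m - n - 1).toNat : Nat) : Int) := by omega
    by_contra hf
    have htrue : pvIsSpecial (n + 1 + (((m - n - 1).toNat : Nat) : Int)) = true := by
      rw [← hj]
      simpa using hf
    have hlt : (m - n - 1).toNat < Nat.find hex := by omega
    exact Nat.find_min hex hlt htrue
  have hble : b ≤ 2888888882 := by
    have hfle : Nat.find hex ≤ (2888888882 - n - 1).toNat := by
      apply Nat.find_min'
      have heq : n + 1 + (((2888888882 - n - 1).toNat : Nat) : Int) = 2888888882 := by omega
      rw [heq]
      exact hCs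
    omega
  have hbpos : 0 < b := by
    by_contra hc
    push_neg at hc
    rw [isSpecial_nonpos b hc] at hbs
    cases hbs
  -- A's loop reaches b
  have hA : solve n = b := by
    rw [solve]
    apply pvLoop_finds 6000000000 (n + 1) b (by omega) hbs
      (fun m hm1 hm2 => hmin m (by omega) hm2)
    omega
  -- b is among B's candidates
  have hbnat : ((b.toNat : Nat) : Int) = b := Int.toNat_of_nonneg (le_of_lt hbpos)
  have hmem : b ∈ altCandsRaw := by
    have hc := complete_altCandsRaw b.toNat (by omega) (by
      have : (10 : Nat) ^ 10 = 10000000000 := by norm_num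
      omega) (by rw [hbnat]; exact hbs)
    rwa [hbnat] at hc
  have hmem2 : b ∈ altCands := by
    rw [altCands]
    exact (PySem.List.mem_sorted _ _ _ b).mpr hmem
  have hpw : altCands.Pairwise (· ≤ ·) := PySem.List.sorted_pairwise altCandsRaw (fun x => x)
  have hfind : altCands.find? (fun v => decide (n < v)) = some b := by
    apply find?_sorted_least _ hpw _ _ hmem2 hnb
    intro c hc hcn
    have hcraw : c ∈ altCandsRaw := (PySem.List.mem_sorted _ _ _ c).mp hc
    obtain ⟨hcpos, hcs⟩ := sound_altCandsRaw c hcraw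
    have hj : c = n + 1 + (((c - n - 1).toNat : Nat) : Int) := by omega
    have hfle : Nat.find hex ≤ (c - n - 1).toNat := by
      apply Nat.find_min'
      rw [← hj]
      exact hcs
    omega
  rw [hA, solve_alt, hfind]
  rfl
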